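-- pv_equiv track=rewrite | github.com/algogazaa/algogazaa | 구현/카카오2023-4번/221203_박지연.py | solution
-- ===== SOURCE A (Python) =====
-- from collections import deque
--
-- def solution(numbers):
--     answer = [-1 for _ in range(len(numbers))]
--
--     for i in range(len(numbers)):
--         bin_num = bin(numbers[i])[2:]
--         j, k = 0, 0
--
--         while True:
--             if j >= len(bin_num):
--                 break
--             j += 2**k
--             k += 1
--
--         if j - len(bin_num) > 1:
--             answer[i] = 0
--             continue
--         else:
--             bin_num = '0' * (j - len(bin_num)) + bin_num
--
--         queue = deque()
--         queue.append(bin_num)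
--         is_ok = True
--
--         while queue:
--             num = queue.popleft()
--             left, middle, right = num[:len(num)//2], num[len(num)//2], num[len(num)//2+1:]
--             if middle != '0':
--                 if len(left) >= 3:
--                     queue.append(left)
--                     queue.append(right)
--             else:
--                 is_ok = False
--                 break
--
--         if is_ok:
--             answer[i] = 1
--         else:
--             answer[i] = 0
--
--     return answer
-- ===== SOURCE B (Python) =====
-- def solution(numbers):
--     def check(s):
--         mid = len(s) // 2
--         if s[mid] == '0':
--             return False
--         if mid >= 3:
--             return check(s[:mid]) and check(s[mid + 1:])
--         return True
--
--     result = []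
--     for n in numbers:
--         s = bin(n)[2:]
--         total = (1 << len(s).bit_length()) - 1
--         pad = total - len(s)
--         result.append(1 if pad <= 1 and check('0' * pad + s) else 0)
--     return result
-- ===== Notes on version B (the rewrite author's own statement) =====
-- stated objective: alternative
-- what changed: The explicit deque BFS over substrings with an is_ok flag is replaced by a direct recursive validity check over the left/right halves, and the j/k padding accumulation loop by a closed-form int.bit_length() computation.
import Mathlib
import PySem

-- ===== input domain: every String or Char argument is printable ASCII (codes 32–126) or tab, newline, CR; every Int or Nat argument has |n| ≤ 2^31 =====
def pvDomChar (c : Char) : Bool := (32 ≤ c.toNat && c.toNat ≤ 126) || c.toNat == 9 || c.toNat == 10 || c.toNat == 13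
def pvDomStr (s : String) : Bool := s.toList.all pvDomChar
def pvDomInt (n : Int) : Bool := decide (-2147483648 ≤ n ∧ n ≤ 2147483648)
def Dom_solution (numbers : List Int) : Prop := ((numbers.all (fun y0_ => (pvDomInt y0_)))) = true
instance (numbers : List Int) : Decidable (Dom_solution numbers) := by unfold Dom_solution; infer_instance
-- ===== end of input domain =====

-- ===== PORT A =====
-- shared helper: Python's bin(n)[2:] as a list of chars (exact, incl. the 'b' kept for n < 0)
def pvNatBits (n : Nat) : List Char :=
  if h : n = 0 then [] else pvNatBits (n / 2) ++ [if n % 2 = 1 then '1' else '0']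
  decreasing_by exact Nat.div_lt_self (Nat.pos_of_ne_zero h) (by norm_num)

def pvBinDrop2 (n : Int) : List Char :=
  if n < 0 then 'b' :: pvNatBits (-n).toNat
  else if n = 0 then ['0'] else pvNatBits n.toNat

-- the j,k accumulation loop of A
def padLoopA (len j k : Nat) : Nat :=
  if j ≥ len then j else padLoopA len (j + 2 ^ k) (k + 1)
  termination_by len - j
  decreasing_by have := Nat.two_pow_pos k; omega

-- the while-queue BFS of A; num is always nonempty here, so the '.getD' default of the
-- middle-index lookup (Python would raise IndexError on an empty string) is never used
def bfsA : List (List Char) → Bool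
  | [] => true
  | num :: rest =>
    let mid := num.length / 2
    let left := num.take mid
    let middle := (PySem.List.pyGet? num (mid : Int)).getD '0'
    let right := num.drop (mid + 1)
    if middle ≠ '0' then
      if left.length ≥ 3 then bfsA (rest ++ [left, right]) else bfsA rest
    else false
  termination_by q => 2 * (q.map List.length).sum + q.length
  decreasing_by
    · rename_i h1 h2
      have h3 : (List.take (num.length / 2) num).length ≥ 3 := h2
      simp only [List.length_take] at h3
      simp only [List.map_append, List.map_cons, List.map_nil, List.sum_append, List.sum_cons,
        List.sum_nil, List.length_append, List.length_cons, List.length_nil, List.length_take,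
        List.length_drop]
      omega
    · simp only [List.map_cons, List.sum_cons, List.length_cons]; omega

-- the body of A's for-loop for one number
def bodyA (n : Int) : Int :=
  let bin0 := pvBinDrop2 n
  let j := padLoopA bin0.length 0 0
  if j - bin0.length > 1 then 0
  else
    let binp := List.replicate (j - bin0.length) '0' ++ bin0
    if bfsA [binp] then 1 else 0

def solution (numbers : List Int) : List Int :=
  (List.range numbers.length).foldl
    (fun ans i => ans.set i (bodyA ((PySem.List.pyGet? numbers (i : Int)).getD 0)))
    (List.replicate numbers.length (-1))

-- ===== PORT B =====
-- B replaces the explicit deque BFS with a recursive check over the two halves, and the j/k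
-- padding loop with Python's int.bit_length() (objective: alternative decomposition).

-- Python's int.bit_length()
def pvBitLength (n : Nat) : Nat := if n = 0 then 0 else Nat.log2 n + 1

-- B's recursive check; s is always nonempty here, so the '.getD' default is never used
def checkB (s : List Char) : Bool :=
  let mid := s.length / 2
  if (PySem.List.pyGet? s (mid : Int)).getD '0' = '0' then false
  else if mid ≥ 3 then checkB (s.take mid) && checkB (s.drop (mid + 1)) else true
  termination_by s.length
  decreasing_by
    · simp only [List.length_take]; omega
    · simp only [List.length_drop]; omega

def bodyB (n : Int) : Int :=
  let s := pvBinDrop2 n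
  let total := 2 ^ pvBitLength s.length - 1
  let pad := total - s.length
  if pad ≤ 1 && checkB (List.replicate pad '0' ++ s) then 1 else 0

def solution_alt (numbers : List Int) : List Int :=
  numbers.foldl (fun acc n => acc ++ [bodyB n]) []

-- ===== PRECONDITION & SPEC =====
def Spec_solution (numbers : List Int) (out : List Int) : Prop := out = solution_alt numbers
instance (numbers : List Int) (out : List Int) : Decidable (Spec_solution numbers out) := by unfold Spec_solution; infer_instance

-- ===== CLAIM (what is proved, stated in full; the proofs are below) =====
def Claim_equal_solution : Prop := ∀ (numbers : List Int), Dom_solution numbers → Spec_solution numbers (solution numbers)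

-- ===== LEMMAS AND PROOFS =====

-- the two padding computations agree: A's loop stops at the first 2^k - 1 ≥ len,
-- and that k is exactly bit_length len
lemma pvBitLength_unique (len k : Nat) (hall : ∀ j, j < k → 2 ^ j ≤ len) (hlt : len < 2 ^ k) :
    pvBitLength len = k := by
  cases k with
  | zero => interval_cases len; rfl
  | succ k' =>
    have h1 : 2 ^ k' ≤ len := hall k' (Nat.lt_succ_self k')
    have hpos : len ≠ 0 := by have := Nat.two_pow_pos k'; omega
    unfold pvBitLength
    rw [if_neg hpos, Nat.log2_eq_log_two, Nat.log_eq_of_pow_le_of_lt_pow h1 hlt]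

lemma padLoopA_eq (m : Nat) : ∀ k len, len + 1 - 2 ^ k ≤ m → (∀ j, j < k → 2 ^ j ≤ len) →
    padLoopA len (2 ^ k - 1) k = 2 ^ pvBitLength len - 1 := by
  induction m with
  | zero =>
    intro k len hm hall
    have hlt : len < 2 ^ k := by have := Nat.two_pow_pos k; omega
    rw [padLoopA, if_pos (by omega), pvBitLength_unique len k hall hlt]
  | succ m ih =>
    intro k len hm hall
    by_cases hlt : len < 2 ^ k
    · rw [padLoopA, if_pos (by omega), pvBitLength_unique len k hall hlt]
    · have hpos := Nat.two_pow_pos k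
      rw [padLoopA, if_neg (by omega)]
      have hstep : 2 ^ k - 1 + 2 ^ k = 2 ^ (k + 1) - 1 := by rw [pow_succ]; omega
      rw [hstep]
      apply ih (k + 1) len
      · rw [pow_succ]; omega
      · intro j hj
        rcases Nat.lt_succ_iff_lt_or_eq.mp hj with h | h
        · exact hall j h
        · subst h; omega

lemma padLoopA_zero (len : Nat) : padLoopA len 0 0 = 2 ^ pvBitLength len - 1 := by
  have := padLoopA_eq (len + 1) 0 len (by norm_num) (by omega)
  simpa using this

-- the BFS over a queue answers: every queued string passes the recursive check
lemma bfsA_all (q : List (List Char)) : bfsA q = q.all checkB := by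
  induction q using bfsA.induct with
  | case1 => rw [bfsA]; rfl
  | case2 num rest mid left middle right hne hlen ih =>
    have h3 : (List.take (num.length / 2) num).length ≥ 3 := hlen
    simp only [List.length_take] at h3
    have hne' : ¬ ((PySem.List.pyGet? num ((num.length / 2 : Nat) : Int)).getD '0') = '0' := hne
    have hlen' : (List.take (num.length / 2) num).length ≥ 3 := hlen
    have ih' : bfsA (rest ++ [List.take (num.length / 2) num, List.drop (num.length / 2 + 1) num])
        = (rest ++ [List.take (num.length / 2) num, List.drop (num.length / 2 + 1) num]).all checkB := ih
    rw [bfsA]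
    rw [if_pos hne', if_pos hlen', ih']
    rw [List.all_cons, checkB.eq_def]
    rw [if_neg hne', if_pos (show num.length / 2 ≥ 3 by omega)]
    simp only [List.all_append, List.all_cons, List.all_nil, Bool.and_true]
    cases checkB (List.take (num.length / 2) num) <;>
      cases checkB (List.drop (num.length / 2 + 1) num) <;> cases rest.all checkB <;> rfl
  | case3 num rest mid left middle hne hlen ih =>
    have h3 : ¬ (List.take (num.length / 2) num).length ≥ 3 := hlen
    simp only [List.length_take] at h3
    have hne' : ¬ ((PySem.List.pyGet? num ((num.length / 2 : Nat) : Int)).getD '0') = '0' := hne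
    have hlen' : ¬ (List.take (num.length / 2) num).length ≥ 3 := hlen
    rw [bfsA]
    rw [if_pos hne', if_neg hlen', ih]
    rw [List.all_cons, checkB.eq_def]
    rw [if_neg hne', if_neg (show ¬ num.length / 2 ≥ 3 by omega)]
    cases rest.all checkB <;> rfl
  | case4 num rest mid middle hmid =>
    have hmid' : ((PySem.List.pyGet? num ((num.length / 2 : Nat) : Int)).getD '0') = '0' := by
      by_contra hc; exact hmid hc
    rw [bfsA]
    rw [if_neg (show ¬ ((PySem.List.pyGet? num ((num.length / 2 : Nat) : Int)).getD '0') ≠ '0' from hmid)]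
    rw [List.all_cons, checkB.eq_def, if_pos hmid']
    rfl

-- per-number agreement of the two loop bodies
lemma body_eq (n : Int) : bodyA n = bodyB n := by
  simp only [bodyA, bodyB, padLoopA_zero, bfsA_all, List.all_cons, List.all_nil, Bool.and_true]
  by_cases h : 2 ^ pvBitLength (pvBinDrop2 n).length - 1 - (pvBinDrop2 n).length > 1
  · rw [if_pos h]
    have h2 : ¬ (2 ^ pvBitLength (pvBinDrop2 n).length - 1 - (pvBinDrop2 n).length ≤ 1) := by omega
    simp [h2]
  · rw [if_neg h]
    have h2 : 2 ^ pvBitLength (pvBinDrop2 n).length - 1 - (pvBinDrop2 n).length ≤ 1 := by omega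
    simp [h2]

lemma foldl_append_map (f : Int → Int) (xs : List Int) :
    ∀ acc, xs.foldl (fun a n => a ++ [f n]) acc = acc ++ xs.map f := by
  induction xs with
  | nil => simp
  | cons x xs ih => intro acc; simp [List.foldl, ih, List.map]

lemma foldl_set_getElem? (g : Nat → Int) :
    ∀ (n k : Nat) (acc : List Int) (j : Nat),
      ((List.range' k n).foldl (fun ans i => ans.set i (g i)) acc)[j]? =
        if k ≤ j ∧ j < k + n ∧ j < acc.length then some (g j) else acc[j]? := by
  intro n
  induction n with
  | zero => intro k acc j; rw [List.range'_zero, List.foldl_nil, if_neg (by omega)]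
  | succ n ih =>
    intro k acc j
    rw [List.range'_succ, List.foldl_cons, ih]
    simp only [List.length_set, List.getElem?_set]
    by_cases h1 : k + 1 ≤ j ∧ j < k + 1 + n ∧ j < acc.length
    · rw [if_pos h1, if_pos (by omega)]
    · rw [if_neg h1]
      by_cases h2 : k = j
      · subst h2
        rw [if_pos rfl]
        by_cases hk : k < acc.length
        · rw [if_pos hk, if_pos (by omega)]
        · rw [if_neg hk, if_neg (by omega), List.getElem?_eq_none (by omega)]
      · rw [if_neg h2, if_neg (by omega)]

lemma solution_eq_map (xs : List Int) : solution xs = xs.map bodyA := by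
  unfold solution
  apply List.ext_getElem?
  intro j
  rw [List.range_eq_range',
    foldl_set_getElem? (fun i => bodyA ((PySem.List.pyGet? xs (i : Int)).getD 0))]
  simp only [List.length_replicate]
  by_cases hj : j < xs.length
  · rw [if_pos (by omega)]
    rw [List.getElem?_map, List.getElem?_eq_getElem hj]
    rw [PySem.List.pyGet?_natCast, List.getElem?_eq_getElem hj]
    rfl
  · rw [if_neg (by omega), List.getElem?_eq_none (by simp only [List.length_replicate]; omega),
      List.getElem?_eq_none (by simp only [List.length_map]; omega)]

-- ===== VERDICT (by name: the statement is the Claim_ definition above) =====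
theorem solution_spec : Claim_equal_solution := by
  intro numbers _
  unfold Spec_solution solution_alt
  rw [foldl_append_map, List.nil_append, solution_eq_map]
  exact List.map_congr_left (fun n _ => body_eq n)
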